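-- pv_equiv track=rewrite | github.com/MichelGerding/HBO-ICT-opdrachten-pgm-2 | week_8/wk8ex2.py | sum67
-- ===== SOURCE A (Python) =====
-- def sum67(nums):
--   """ Return the sum of the numbers in the array, except ignore sections of
--       numbers starting with a 6 and extending to the next 7
--       Argument: nums a list of numbers
--   """
--   total = 0
--
--   in_6 = False
--   for i in nums:
--     if i == 6:
--       in_6 = True
--       continue
--
--     if in_6:
--       if i == 7:
--         in_6 = False
--       continue
--
--     total += i
--   return total
-- ===== SOURCE B (Python) =====
-- def sum67(nums):
--   """ Return the sum of the numbers in the array, except ignore sections of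
--       numbers starting with a 6 and extending to the next 7
--       Argument: nums a list of numbers
--   """
--   total = 0
--   i = 0
--   n = len(nums)
--   while i < n:
--     if nums[i] == 6:
--       i += 1
--       while i < n and nums[i] != 7:
--         i += 1
--       i += 1  # step past the closing 7 (or past the end)
--     else:
--       total += nums[i]
--       i += 1
--   return total
-- ===== Notes on version B (the rewrite author's own statement) =====
-- stated objective: alternative
-- what changed: Replaces the flag-carrying single for-loop with an index while-loop: on a 6 an inner loop skips forward to just past the next 7, so no in_6 state is carried across iterations.
import Mathlib
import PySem

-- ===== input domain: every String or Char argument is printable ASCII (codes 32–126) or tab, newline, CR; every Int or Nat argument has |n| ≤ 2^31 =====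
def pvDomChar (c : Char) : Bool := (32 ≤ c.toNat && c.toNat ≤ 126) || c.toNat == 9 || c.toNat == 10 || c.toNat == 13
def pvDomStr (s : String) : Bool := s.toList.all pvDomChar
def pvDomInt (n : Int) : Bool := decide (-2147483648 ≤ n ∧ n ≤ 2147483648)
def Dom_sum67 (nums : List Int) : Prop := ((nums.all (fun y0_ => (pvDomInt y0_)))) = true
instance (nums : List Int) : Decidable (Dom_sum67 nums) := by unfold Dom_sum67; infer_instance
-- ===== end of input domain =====

-- B replaces A's flag-carrying single pass by an outer index scan with an inner skip-to-next-7 loop (alternative decomposition, same cost).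

-- ===== PORT A =====
-- for-loop carrying (total, in_6), branches in source order
def sum67 (nums : List Int) : Int :=
  (nums.foldl (fun (s : Int × Bool) i =>
      if i == 6 then (s.1, true)
      else if s.2 then (if i == 7 then (s.1, false) else s)
      else (s.1 + i, s.2))
    (0, false)).1

-- ===== PORT B =====
-- inner while-loop of Source B: advance until just past the next 7 (or the end)
def sum67Skip (rest : List Int) : List Int :=
  match rest with
  | [] => []
  | y :: t => if y == 7 then t else sum67Skip t

theorem sum67Skip_len_le (rest : List Int) : (sum67Skip rest).length ≤ rest.length := by
  induction rest with
  | nil => simp [sum67Skip]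
  | cons y t ih =>
    simp only [sum67Skip]
    split
    · simp
    · exact Nat.le_succ_of_le ih

-- outer while-loop of Source B over the remaining suffix
def sum67Go (rest : List Int) : Int :=
  match rest with
  | [] => 0
  | x :: t => if x == 6 then sum67Go (sum67Skip t) else x + sum67Go t
termination_by rest.length
decreasing_by
  · exact Nat.lt_succ_of_le (sum67Skip_len_le t)
  · exact Nat.lt_succ_self _

def sum67_alt (nums : List Int) : Int := sum67Go nums

-- ===== PRECONDITION & SPEC =====
def Spec_sum67 (nums : List Int) (out : Int) : Prop := out = sum67_alt nums
instance (nums : List Int) (out : Int) : Decidable (Spec_sum67 nums out) := by unfold Spec_sum67; infer_instance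

-- ===== CLAIM (what is proved, stated in full; the proofs are below) =====
def Claim_equal_sum67 : Prop := ∀ (nums : List Int), Dom_sum67 nums → Spec_sum67 nums (sum67 nums)

-- ===== LEMMAS AND PROOFS =====
theorem sum67_fold_char (nums : List Int) : ∀ (t : Int) (b : Bool),
    (nums.foldl (fun (s : Int × Bool) i => if i == 6 then (s.1, true) else if s.2 then (if i == 7 then (s.1, false) else s) else (s.1 + i, s.2))
      (t, b)).1 = t + (if b then sum67Go (sum67Skip nums) else sum67Go nums) := by
  induction nums with
  | nil => intro t b; cases b <;> simp [sum67Go, sum67Skip]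
  | cons x xs ih =>
    intro t b
    by_cases h6 : x = 6
    · have hstep : List.foldl (fun (s : Int × Bool) i => if i == 6 then (s.1, true) else if s.2 then (if i == 7 then (s.1, false) else s) else (s.1 + i, s.2)) (t, b) (x :: xs)
          = List.foldl (fun (s : Int × Bool) i => if i == 6 then (s.1, true) else if s.2 then (if i == 7 then (s.1, false) else s) else (s.1 + i, s.2)) (t, true) xs := by
        simp [h6]
      rw [hstep, ih]
      cases b <;> simp [sum67Go, sum67Skip, h6]
    · cases b with
      | false =>
        have hstep : List.foldl (fun (s : Int × Bool) i => if i == 6 then (s.1, true) else if s.2 then (if i == 7 then (s.1, false) else s) else (s.1 + i, s.2)) (t, false) (x :: xs)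
            = List.foldl (fun (s : Int × Bool) i => if i == 6 then (s.1, true) else if s.2 then (if i == 7 then (s.1, false) else s) else (s.1 + i, s.2)) (t + x, false) xs := by
          simp [h6]
        rw [hstep, ih]
        simp [sum67Go, h6]
        ring
      | true =>
        by_cases h7 : x = 7
        · have hstep : List.foldl (fun (s : Int × Bool) i => if i == 6 then (s.1, true) else if s.2 then (if i == 7 then (s.1, false) else s) else (s.1 + i, s.2)) (t, true) (x :: xs)
              = List.foldl (fun (s : Int × Bool) i => if i == 6 then (s.1, true) else if s.2 then (if i == 7 then (s.1, false) else s) else (s.1 + i, s.2)) (t, false) xs := by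
            simp [h6, h7]
          rw [hstep, ih]
          simp [sum67Skip, h7]
        · have hstep : List.foldl (fun (s : Int × Bool) i => if i == 6 then (s.1, true) else if s.2 then (if i == 7 then (s.1, false) else s) else (s.1 + i, s.2)) (t, true) (x :: xs)
              = List.foldl (fun (s : Int × Bool) i => if i == 6 then (s.1, true) else if s.2 then (if i == 7 then (s.1, false) else s) else (s.1 + i, s.2)) (t, true) xs := by
            simp [h6, h7]
          rw [hstep, ih]
          simp [sum67Skip, h7]

-- ===== VERDICT (by name: the statement is the Claim_ definition above) =====
theorem sum67_spec : Claim_equal_sum67 := by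
  intro nums _
  show sum67 nums = sum67_alt nums
  rw [sum67, sum67_alt, sum67_fold_char]
  simp
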